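-- pv_equiv track=rewrite | github.com/ServaneC/AdventOfCode | 2023/day9/day9-1.py | compute_sequences_result
-- ===== SOURCE A (Python) =====
-- def compute_sequences_result(sequences):
--     current = sequences[-1]
--     current.append(0)
--     for i in range(-2, -len(sequences)-1, -1):
--         ta = current[-1]
--         current = sequences[i]
--         sequences[i].append(current[-1]+ta)
--     return sequences[0][-1]
-- ===== SOURCE B (Python) =====
-- def compute_sequences_result(sequences):
--     return sum(row[-1] for row in sequences[:-1])
-- ===== Notes on version B (the rewrite author's own statement) =====
-- stated objective: simpler
-- what changed: A's backward loop that appends running suffix values into each sequence is replaced by a closed-form one-liner: the result equals the sum of the original last elements of all rows except the final one; B performs no mutation (equivalence is about the return value only).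
import Mathlib
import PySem

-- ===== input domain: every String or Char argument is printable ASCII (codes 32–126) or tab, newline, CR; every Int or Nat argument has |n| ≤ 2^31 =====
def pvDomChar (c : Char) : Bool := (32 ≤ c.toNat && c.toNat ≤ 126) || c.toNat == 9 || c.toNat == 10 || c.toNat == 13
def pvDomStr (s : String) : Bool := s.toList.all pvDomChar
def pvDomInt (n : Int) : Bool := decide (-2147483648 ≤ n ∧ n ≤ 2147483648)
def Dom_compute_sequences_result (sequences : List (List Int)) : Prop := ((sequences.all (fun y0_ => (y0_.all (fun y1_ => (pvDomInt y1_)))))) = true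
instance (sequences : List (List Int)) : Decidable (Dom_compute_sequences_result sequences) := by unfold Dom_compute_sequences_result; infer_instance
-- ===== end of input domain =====

-- B replaces A's backward append-and-carry loop by a closed form: the result is the sum of the
-- last elements of all rows but the final one (objective: simpler). A mutates `sequences` in
-- place (appends one value to each row); B does not mutate — the equivalence proved here is
-- about the RETURN value only.

-- ===== PORT A =====
-- Python mutation `current.append(0)` of the shared object sequences[-1] is modelled by
-- rebuilding: current := sequences[-1] ++ [0]; sequences := sequences with [-1] replaced.
def compute_sequences_result (sequences : List (List Int)) : Int :=
  let current := PySem.List.pyGetD sequences (-1) [] ++ [(0 : Int)]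
  let seqs := PySem.List.pySetD sequences (-1) current
  let res :=
    (PySem.List.pyRange (-2) (-(sequences.length : Int) - 1) (-1)).foldl
      (fun (st : List (List Int) × List Int) i =>
        let ta := PySem.List.pyGetD st.2 (-1) 0
        let cur := PySem.List.pyGetD st.1 i []
        let newseq := cur ++ [PySem.List.pyGetD cur (-1) 0 + ta]
        (PySem.List.pySetD st.1 i newseq, newseq))
      (seqs, current)
  PySem.List.pyGetD (PySem.List.pyGetD res.1 0 []) (-1) 0

-- ===== PORT B =====
-- sum(row[-1] for row in sequences[:-1]); row[-1] ported with the PySem default (Pre_ excludes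
-- the raising rows).
def compute_sequences_result_alt (sequences : List (List Int)) : Int :=
  (PySem.List.slice sequences none (some (-1))).foldl
    (fun acc row => acc + PySem.List.pyGetD row (-1) 0) 0

-- ===== PRECONDITION & SPEC =====
-- Pre_ excludes exactly the inputs on which Python A raises IndexError: the empty outer list
-- (sequences[-1]), and any empty inner list other than the last one (current[-1] on it).
def Pre_compute_sequences_result (sequences : List (List Int)) : Prop :=
  sequences ≠ [] ∧ ∀ s ∈ sequences.dropLast, s ≠ []
instance (sequences : List (List Int)) : Decidable (Pre_compute_sequences_result sequences) := by unfold Pre_compute_sequences_result; infer_instance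
def pvWitness_compute_sequences_result : List (List Int) := [[1, 3], [2, 5], [7]]
def Spec_compute_sequences_result (sequences : List (List Int)) (out : Int) : Prop := out = compute_sequences_result_alt sequences
instance (sequences : List (List Int)) (out : Int) : Decidable (Spec_compute_sequences_result sequences out) := by unfold Spec_compute_sequences_result; infer_instance

-- ===== CLAIM (what is proved, stated in full; the proofs are below) =====
def Claim_equal_compute_sequences_result : Prop := ∀ (sequences : List (List Int)), Dom_compute_sequences_result sequences → Pre_compute_sequences_result sequences → Spec_compute_sequences_result sequences (compute_sequences_result sequences)

-- ===== LEMMAS AND PROOFS =====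

-- last element of an inner list, as both programs read it (`s[-1]` with the PySem default)
def pvLastD (s : List Int) : Int := PySem.List.pyGetD s (-1) 0

-- sum of the last elements of sequences[j], …, sequences[n-2]: the value A carries
def pvTailSum (orig : List (List Int)) (j : Nat) : Int :=
  (((orig.dropLast).drop j).map pvLastD).sum

lemma pvTailSum_last (orig : List (List Int)) (j : Nat) (h : orig.length ≤ j + 1) :
    pvTailSum orig j = 0 := by
  unfold pvTailSum
  rw [List.drop_eq_nil_of_le (by simp [List.length_dropLast]; omega)]
  simp

lemma pvTailSum_step (orig : List (List Int)) (j : Nat) (h : j + 1 < orig.length) :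
    pvTailSum orig j = pvLastD (orig.getD j []) + pvTailSum orig (j + 1) := by
  have hj : j < orig.dropLast.length := by simp [List.length_dropLast]; omega
  unfold pvTailSum
  rw [List.drop_eq_getElem_cons hj]
  simp [List.getElem_dropLast, List.getElem?_eq_getElem (show j < orig.length by omega)]

-- pySetD at a negative in-range index is List.set at the corresponding position
lemma pvSetD_neg' (xs : List (List Int)) (k : Nat) (v : List Int) (h1 : 0 < k) (h2 : k ≤ xs.length) :
    PySem.List.pySetD xs (-(k : Int)) v = xs.set (xs.length - k) v := by
  have hb : -((xs.length : Int)) ≤ -(k : Int) := by omega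
  have hk0 : k ≠ 0 := by omega
  simp [PySem.List.pySetD, PySem.List.pySet?, PySem.List.pyIdx?, hb, hk0]

-- range(a, b-1, -1) = range(a, b, -1) ++ [b]  for b ≤ a
lemma pvRange_neg_one_snoc (a b : Int) (h : b ≤ a) :
    PySem.List.pyRange a (b - 1) (-1) = PySem.List.pyRange a b (-1) ++ [b] := by
  rw [PySem.List.pyRange_neg_one, PySem.List.pyRange_neg_one]
  have h1 : (a - (b - 1)).toNat = (a - b).toNat + 1 := by omega
  rw [h1, List.range_succ, List.map_append]
  simp
  omega

-- invariant of A's loop: after processing i = -2 … -m the state is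
-- (take (n-m) ++ C :: rest, C) with C = sequences[n-m] ++ [pvTailSum n-m]
lemma pvA_inv (orig : List (List Int)) (m : Nat) (h1 : 1 ≤ m) (hm : m ≤ orig.length) :
    ∃ rest : List (List Int),
      (PySem.List.pyRange (-2) (-(m : Int) - 1) (-1)).foldl
          (fun (st : List (List Int) × List Int) i =>
            let ta := PySem.List.pyGetD st.2 (-1) 0
            let cur := PySem.List.pyGetD st.1 i []
            let newseq := cur ++ [PySem.List.pyGetD cur (-1) 0 + ta]
            (PySem.List.pySetD st.1 i newseq, newseq))
          (PySem.List.pySetD orig (-1) (PySem.List.pyGetD orig (-1) [] ++ [(0 : Int)]),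
            PySem.List.pyGetD orig (-1) [] ++ [(0 : Int)]) =
        (orig.take (orig.length - m) ++
            (orig.getD (orig.length - m) [] ++ [pvTailSum orig (orig.length - m)]) :: rest,
          orig.getD (orig.length - m) [] ++ [pvTailSum orig (orig.length - m)]) ∧
      rest.length = m - 1 := by
  induction m, h1 using Nat.le_induction with
  | base =>
    refine ⟨[], ?_, rfl⟩
    have hn : 1 ≤ orig.length := hm
    have hc : -((1 : Nat) : Int) - 1 = -2 := by norm_num
    rw [hc, PySem.List.pyRange_neg_one_eq_nil (le_refl _)]
    simp only [List.foldl_nil]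
    have hget : PySem.List.pyGetD orig (-1) [] = orig.getD (orig.length - 1) [] := by
      rw [PySem.List.pyGetD_neg_ofNat orig 1 [] (by omega) (by omega),
        List.getD_eq_getElem _ _ (by omega)]
    have hts : pvTailSum orig (orig.length - 1) = 0 := pvTailSum_last orig _ (by omega)
    have hset : PySem.List.pySetD orig (-1) (PySem.List.pyGetD orig (-1) [] ++ [(0 : Int)]) =
        orig.set (orig.length - 1) (PySem.List.pyGetD orig (-1) [] ++ [(0 : Int)]) := by
      rw [show (-1 : Int) = -((1 : Nat) : Int) by norm_num,
        pvSetD_neg' orig 1 _ (by omega) (by omega)]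
    rw [hset, hget, hts, List.set_eq_take_append_cons_drop]
    simp only [if_pos (by omega : orig.length - 1 < orig.length)]
    rw [show orig.length - 1 + 1 = orig.length by omega, List.drop_length]
  | succ m hm1 ih =>
    obtain ⟨rest, hfold, hlen⟩ := ih (by omega)
    have hc : -(((m + 1 : Nat)) : Int) - 1 = (-(m : Int) - 1) - 1 := by push_cast; ring
    rw [hc, pvRange_neg_one_snoc (-2) (-(m : Int) - 1) (by omega), List.foldl_append, hfold]
    simp only [List.foldl_cons, List.foldl_nil]
    set n := orig.length with hn
    have hmn : m + 1 ≤ n := hm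
    have htake : orig.take (n - m) = orig.take (n - m - 1) ++ [orig[n - m - 1]'(by omega)] := by
      have h := List.take_succ_eq_append_getElem (l := orig) (i := n - m - 1) (by omega)
      rw [show n - m - 1 + 1 = n - m by omega] at h
      exact h
    set C := orig.getD (n - m) [] ++ [pvTailSum orig (n - m)] with hC
    have hTlen : (orig.take (n - m - 1)).length = n - m - 1 := by
      rw [List.length_take]; omega
    clear hc ih hfold
    have hSlen : (orig.take (n - m) ++ C :: rest).length = n := by
      have h1 : (orig.take (n - m)).length = n - m := by rw [List.length_take]; omega
      rw [List.length_append, h1, List.length_cons, hlen]; omega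
    have hta : PySem.List.pyGetD C (-1) 0 = pvTailSum orig (n - m) :=
      PySem.List.pyGetD_neg_one_append_singleton _ _ _
    have hidx : -(m : Int) - 1 = -(((m + 1 : Nat)) : Int) := by push_cast; ring
    have hcur : PySem.List.pyGetD (orig.take (n - m) ++ C :: rest) (-(m : Int) - 1) [] =
        orig[n - m - 1]'(by omega) := by
      rw [hidx, PySem.List.pyGetD_neg_natCast _ (m + 1) _ (by omega) (by rw [hSlen]; omega)]
      simp only [htake, List.append_assoc]
      rw [List.getElem_append_right (by simp [hTlen, hlen]; omega)]
      have h0 : n - m - 1 + (rest.length + 1 + 1) - (m + 1) - (n - m - 1) = 0 := by omega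
      simp [hTlen, h0]
    have hset : PySem.List.pySetD (orig.take (n - m) ++ C :: rest) (-(m : Int) - 1)
          (orig[n - m - 1]'(by omega) ++
            [PySem.List.pyGetD (orig[n - m - 1]'(by omega)) (-1) 0 + pvTailSum orig (n - m)]) =
        orig.take (n - m - 1) ++
          (orig[n - m - 1]'(by omega) ++
            [PySem.List.pyGetD (orig[n - m - 1]'(by omega)) (-1) 0 + pvTailSum orig (n - m)]) ::
            (C :: rest) := by
      rw [hidx, pvSetD_neg' _ (m + 1) _ (by omega) (by rw [hSlen]; omega), hSlen, htake,
        List.append_assoc]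
      rw [List.set_append_right _ _ (by rw [hTlen]; omega)]
      rw [hTlen, show n - (m + 1) - (n - m - 1) = 0 by omega]
      rfl
    refine ⟨C :: rest, ?_, by simp only [List.length_cons, hlen]; omega⟩
    simp only [hta, hcur, hset]
    have hgetD : orig.getD (n - (m + 1)) [] = orig[n - m - 1]'(by omega) := by
      rw [List.getD_eq_getElem _ _ (by omega)]
      congr 1
    have hts : pvTailSum orig (n - (m + 1)) =
        PySem.List.pyGetD (orig[n - m - 1]'(by omega)) (-1) 0 + pvTailSum orig (n - m) := by
      have := pvTailSum_step orig (n - m - 1) (by omega)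
      rw [show n - (m + 1) = n - m - 1 by omega, this,
        show n - m - 1 + 1 = n - m by omega]
      rw [List.getD_eq_getElem _ _ (by omega)]
      rfl
    rw [hgetD, hts]
    rfl

lemma pvA_value (orig : List (List Int)) (h : orig ≠ []) :
    compute_sequences_result orig = pvTailSum orig 0 := by
  have hlen : 1 ≤ orig.length := by
    cases orig with
    | nil => exact absurd rfl h
    | cons a t => simp
  obtain ⟨rest, hfold, -⟩ := pvA_inv orig orig.length hlen (le_refl _)
  simp only [compute_sequences_result]
  rw [hfold]
  simp [PySem.List.pyGetD_zero_cons, PySem.List.pyGetD_neg_one_append_singleton]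

lemma pvB_value (orig : List (List Int)) :
    compute_sequences_result_alt orig = pvTailSum orig 0 := by
  simp only [compute_sequences_result_alt, PySem.List.slice_to_neg_one,
    PySem.List.foldl_add (g := fun row => PySem.List.pyGetD row (-1) 0)]
  unfold pvTailSum pvLastD
  simp

-- ===== VERDICT (by name: the statement is the Claim_ definition above) =====
theorem compute_sequences_result_spec : Claim_equal_compute_sequences_result := by
  intro sequences _ hpre
  unfold Spec_compute_sequences_result
  rw [pvA_value sequences hpre.1, pvB_value sequences]
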